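-- pv_equiv track=rewrite | github.com/Oleg-algebra/CTF_Practice | Crypto/Advanced_Crypto_v2.py | key_breaker
-- ===== SOURCE A (Python) =====
-- import string
--
-- def is_right_byte(lst,bt):
--     for char in lst:
--         if chr(ord(char)^bt) not in string.printable:
--             return False
--         else:
--             continue
--
--     return True
--
-- def key_breaker(lst_key):
--     key_parts = {}
--     count=0
--     for el in lst_key:
--         lst=[]
--         for i in range(0,257):
--             if is_right_byte(el,i):
--                 lst.append(i)
--         key_parts['block_'+str(count)]=lst
--         count+=1
--
--     return key_parts
-- ===== SOURCE B (Python) =====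
-- import string
--
-- _PRINTABLE_CODES = [ord(p) for p in string.printable]
--
-- def key_breaker(lst_key):
--     key_parts = {}
--     for count, block in enumerate(lst_key):
--         cand = set(range(0, 257))
--         for ch in block:
--             o = ord(ch)
--             cand &= {o ^ p for p in _PRINTABLE_CODES}
--         key_parts['block_' + str(count)] = sorted(cand)
--     return key_parts
-- ===== Notes on version B (the rewrite author's own statement) =====
-- stated objective: alternative
-- what changed: Instead of scanning all 257 candidate bytes and re-testing every character of the block against the printable string for each (A), B builds for each character the set of bytes that XOR it into a printable character and intersects these sets into a seeded 0..256 universe, then sorts the survivors.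
import Mathlib
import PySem

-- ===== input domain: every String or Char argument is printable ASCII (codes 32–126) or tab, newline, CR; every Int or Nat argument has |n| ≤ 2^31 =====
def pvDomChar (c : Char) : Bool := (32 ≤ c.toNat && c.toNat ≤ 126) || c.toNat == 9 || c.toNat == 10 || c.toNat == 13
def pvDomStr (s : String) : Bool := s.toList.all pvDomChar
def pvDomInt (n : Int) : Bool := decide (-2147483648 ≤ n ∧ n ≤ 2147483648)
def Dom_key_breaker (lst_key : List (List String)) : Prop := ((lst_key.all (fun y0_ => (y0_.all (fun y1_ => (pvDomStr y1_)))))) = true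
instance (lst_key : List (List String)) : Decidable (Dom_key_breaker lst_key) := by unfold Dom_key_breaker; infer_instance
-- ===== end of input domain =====

-- B changes the per-block search: instead of testing each of the 257 candidate bytes against every
-- character of the block (A), B intersects per-character sets of admissible bytes into a seeded
-- 0..256 universe and sorts the result (an alternative algorithm; no speed claim).

-- the character codes of Python's string.printable, in its order (membership is all that is used)
def pvPrintable : List Int := [48, 49, 50, 51, 52, 53, 54, 55, 56, 57, 97, 98, 99, 100, 101, 102, 103, 104, 105, 106, 107, 108, 109, 110, 111, 112, 113, 114, 115, 116, 117, 118, 119, 120, 121, 122, 65, 66, 67, 68, 69, 70, 71, 72, 73, 74, 75, 76, 77, 78, 79, 80, 81, 82, 83, 84, 85, 86, 87, 88, 89, 90, 33, 34, 35, 36, 37, 38, 39, 40, 41, 42, 43, 44, 45, 46, 47, 58, 59, 60, 61, 62, 63, 64, 91, 92, 93, 94, 95, 96, 123, 124, 125, 126, 32, 9, 10, 13, 11, 12]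

-- ord(s): exact for one-character strings (Pre_ guarantees this; Python raises TypeError otherwise)
def pvOrd (s : String) : Int :=
  match s.toList with
  | [c] => (c.toNat : Int)
  | _ => 0

-- ===== PORT A =====
def is_right_byte (lst : List String) (bt : Int) : Bool :=
  match lst with
  | [] => true
  | ch :: rest =>
      -- 'chr(ord(char)^bt) not in string.printable' ported as code membership (exact: chr is injective)
      if !(pvPrintable.contains (PySem.Int.bxor (pvOrd ch) bt)) then false
      else is_right_byte rest bt

def key_breaker (lst_key : List (List String)) : List (String × List Int) :=
  (lst_key.foldl
    (fun (acc : PySem.Dict String (List Int) × Int) el =>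
      let lst := (PySem.List.pyRange 0 257).foldl
        (fun l i => if is_right_byte el i then l ++ [i] else l) []
      (PySem.Dict.insert acc.1 ("block_" ++ PySem.Int.toStr acc.2) lst, acc.2 + 1))
    (PySem.Dict.empty, 0)).1.items

-- ===== PORT B =====
-- the set {o ^ p : p printable} of bytes that XOR character code o into a printable character
def pvCharCands (o : Int) : PySem.Set Int :=
  PySem.Set.ofList (pvPrintable.map (fun p => PySem.Int.bxor o p))

def key_breaker_alt (lst_key : List (List String)) : List (String × List Int) :=
  ((PySem.List.enumerate lst_key).foldl
    (fun (d : PySem.Dict String (List Int)) cb =>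
      let cand := cb.2.foldl
        (fun s ch => PySem.Set.inter s (pvCharCands (pvOrd ch)))
        (PySem.Set.ofList (PySem.List.pyRange 0 257))
      PySem.Dict.insert d ("block_" ++ PySem.Int.toStr cb.1) (PySem.List.sorted cand (fun x => x)))
    PySem.Dict.empty).items

-- ===== PRECONDITION & SPEC =====
-- Pre_ excludes exactly the inputs on which Python's ord() raises TypeError (a string that is not a
-- single character) — A returns on all other inputs.
def Pre_key_breaker (lst_key : List (List String)) : Prop :=
  (lst_key.all (fun el => el.all (fun s => s.toList.length == 1))) = true
instance (lst_key : List (List String)) : Decidable (Pre_key_breaker lst_key) := by unfold Pre_key_breaker; infer_instance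

def pvWitness_key_breaker : List (List String) := [["A", "b"], [], ["!"]]

def Spec_key_breaker (lst_key : List (List String)) (out : List (String × List Int)) : Prop := out = key_breaker_alt lst_key
instance (lst_key : List (List String)) (out : List (String × List Int)) : Decidable (Spec_key_breaker lst_key out) := by unfold Spec_key_breaker; infer_instance

-- ===== CLAIM (what is proved, stated in full; the proofs are below) =====
def Claim_equal_key_breaker : Prop := ∀ (lst_key : List (List String)), Dom_key_breaker lst_key → Pre_key_breaker lst_key → Spec_key_breaker lst_key (key_breaker lst_key)


-- ===== LEMMAS AND PROOFS =====

theorem pvOrd_nonneg (s : String) : 0 ≤ pvOrd s := by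
  unfold pvOrd
  split <;> positivity

theorem pvPrintable_nonneg : ∀ p ∈ pvPrintable, 0 ≤ p := by decide

theorem irb_eq_all (el : List String) (i : Int) :
    is_right_byte el i
      = el.all (fun ch => pvPrintable.contains (PySem.Int.bxor (pvOrd ch) i)) := by
  induction el with
  | nil => rfl
  | cons ch rest ih =>
      show (if !(pvPrintable.contains (PySem.Int.bxor (pvOrd ch) i)) then false
            else is_right_byte rest i) = _
      rw [List.all_cons, ← ih]
      cases pvPrintable.contains (PySem.Int.bxor (pvOrd ch) i) <;> rfl

theorem cands_contains (o i : Int) (ho : 0 ≤ o) (hi : 0 ≤ i) :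
    (pvCharCands o).contains i = pvPrintable.contains (PySem.Int.bxor o i) := by
  obtain ⟨m, rfl⟩ := Int.eq_ofNat_of_zero_le ho
  obtain ⟨k, rfl⟩ := Int.eq_ofNat_of_zero_le hi
  rw [Bool.eq_iff_iff, PySem.Set.contains, List.contains_iff_mem, List.contains_iff_mem,
    pvCharCands, PySem.Set.mem_ofList, List.mem_map]
  constructor
  · rintro ⟨p, hp, hepk⟩
    obtain ⟨q, rfl⟩ := Int.eq_ofNat_of_zero_le (pvPrintable_nonneg p hp)
    rw [← hepk, PySem.Int.bxor_natCast, PySem.Int.bxor_natCast, Nat.xor_xor_cancel_left]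
    exact hp
  · intro hmem
    refine ⟨PySem.Int.bxor (↑m) (↑k), hmem, ?_⟩
    simp [PySem.Int.bxor_natCast, Nat.xor_xor_cancel_left]

theorem all_cands (el : List String) (i : Int) (hi0 : 0 ≤ i) :
    el.all (fun ch => (pvCharCands (pvOrd ch)).contains i)
      = el.all (fun ch => pvPrintable.contains (PySem.Int.bxor (pvOrd ch) i)) := by
  induction el with
  | nil => simp
  | cons ch rest ih =>
      rw [List.all_cons, List.all_cons, ih, cands_contains _ _ (pvOrd_nonneg ch) hi0]

theorem inter_foldl (el : List String) (l : List Int) :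
    el.foldl (fun s ch => PySem.Set.inter s (pvCharCands (pvOrd ch))) l
      = l.filter (fun i => el.all (fun ch => (pvCharCands (pvOrd ch)).contains i)) := by
  induction el generalizing l with
  | nil => simp
  | cons ch rest ih =>
      rw [List.foldl_cons, ih]
      simp only [PySem.Set.inter, List.filter_filter, List.all_cons]
      exact List.filter_congr (fun i _ => by rw [Bool.and_comm])

theorem seed_eq : PySem.Set.ofList (PySem.List.pyRange 0 257) = PySem.List.pyRange 0 257 := by
  apply PySem.Set.ofList_eq_self_of_nodup
  have h : PySem.List.pyRange 0 257 = List.map (fun k : Nat => (k : Int)) (List.range 257) := by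
    exact_mod_cast PySem.List.pyRange_zero_natCast 257
  rw [h]
  exact (List.nodup_range).map (fun a b => by exact_mod_cast id)

theorem range_pairwise : (PySem.List.pyRange 0 257).Pairwise (· < ·) := by
  have h : PySem.List.pyRange 0 257 = List.map (fun k : Nat => (k : Int)) (List.range 257) := by
    exact_mod_cast PySem.List.pyRange_zero_natCast 257
  rw [h]
  exact List.pairwise_lt_range.map _ (fun a b hab => by exact_mod_cast hab)

theorem block_eq (el : List String) :
    (PySem.List.sorted
      (el.foldl (fun s ch => PySem.Set.inter s (pvCharCands (pvOrd ch)))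
        (PySem.Set.ofList (PySem.List.pyRange 0 257))) (fun x => x))
      = (PySem.List.pyRange 0 257).foldl
          (fun l i => if is_right_byte el i then l ++ [i] else l) [] := by
  have hA : (PySem.List.pyRange 0 257).foldl
      (fun l i => if is_right_byte el i then l ++ [i] else l) []
      = (PySem.List.pyRange 0 257).filter (fun i => is_right_byte el i) := by
    simpa using PySem.List.foldl_append_if (fun i => is_right_byte el i) id (PySem.List.pyRange 0 257) []
  have hB : el.foldl (fun s ch => PySem.Set.inter s (pvCharCands (pvOrd ch)))
      (PySem.Set.ofList (PySem.List.pyRange 0 257))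
      = (PySem.List.pyRange 0 257).filter (fun i => is_right_byte el i) := by
    rw [seed_eq, inter_foldl]
    refine List.filter_congr (fun i hi => ?_)
    rw [irb_eq_all, all_cands el i (PySem.List.mem_pyRange_one.mp hi).1]
  rw [hA, hB]
  exact PySem.List.sorted_eq_of_perm_of_pairwise_lt _ _ _ (List.Perm.refl _)
    (range_pairwise.filter _)

theorem outer_eq (lst : List (List String)) (d : PySem.Dict String (List Int)) (c : Int) :
    (lst.foldl
      (fun (acc : PySem.Dict String (List Int) × Int) el =>
        let l := (PySem.List.pyRange 0 257).foldl
          (fun l i => if is_right_byte el i then l ++ [i] else l) []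
        (PySem.Dict.insert acc.1 ("block_" ++ PySem.Int.toStr acc.2) l, acc.2 + 1))
      (d, c)).1
    = (PySem.List.enumerate lst c).foldl
        (fun (dd : PySem.Dict String (List Int)) cb =>
          let cand := cb.2.foldl
            (fun s ch => PySem.Set.inter s (pvCharCands (pvOrd ch)))
            (PySem.Set.ofList (PySem.List.pyRange 0 257))
          PySem.Dict.insert dd ("block_" ++ PySem.Int.toStr cb.1) (PySem.List.sorted cand (fun x => x)))
        d := by
  induction lst generalizing d c with
  | nil => rfl
  | cons el rest ih =>
      simp only [List.foldl_cons, PySem.List.enumerate]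
      rw [ih, block_eq]

-- ===== VERDICT (by name: the statement is the Claim_ definition above) =====
theorem key_breaker_spec : Claim_equal_key_breaker := by
  intro lst_key _ _
  unfold Spec_key_breaker key_breaker key_breaker_alt
  rw [outer_eq]
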